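-- pv_equiv track=rewrite | github.com/Lilac-s/Algorithm | 202203/0324/swea_단순2진암호코드/secret_code.py | find
-- ===== SOURCE A (Python) =====
-- def find(code):
--     odd_num = 0
--     even_num = 0
--     gum = 0
--     for i in range(0, len(code), 7):
--         imsi = code[i:i+7]
--         code2 = 0
--         if imsi == '0001101':
--             code2 = 0
--         if imsi == '0011001':
--             code2 = 1
--         if imsi == '0010011':
--             code2 = 2
--         if imsi == '0111101':
--             code2 = 3
--         if imsi == '0100011':
--             code2 = 4
--         if imsi == '0110001':
--             code2 = 5
--         if imsi == '0101111':
--             code2 = 6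
--         if imsi == '0111011':
--             code2 = 7
--         if imsi == '0110111':
--             code2 = 8
--         if imsi == '0001011':
--             code2 = 9
--         if i % 2 == 0 or i == 0:
--             odd_num += code2
--         if i % 2 == 1 and i != len(code):
--             even_num += code2
--         if i == len(code):
--             gum += code2
--     if (odd_num*3 + even_num + gum) % 10 == 0:
--         return odd_num + even_num + gum
--     else:
--         return 0
-- ===== SOURCE B (Python) =====
-- _DIGITS = {
--     '0001101': 0, '0011001': 1, '0010011': 2, '0111101': 3, '0100011': 4,
--     '0110001': 5, '0101111': 6, '0111011': 7, '0110111': 8, '0001011': 9,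
-- }
--
--
-- def find(code):
--     # Walk the 7-char chunks BACK TO FRONT with a swapping accumulator pair:
--     # no index-parity test anywhere -- prepending a chunk swaps which sum is
--     # "odd-positioned", so each step does (o, e) = (digit + e, o).
--     chunks = [code[i:i + 7] for i in range(0, len(code), 7)]
--     o = e = 0
--     for ch in reversed(chunks):
--         o, e = _DIGITS.get(ch, 0) + e, o
--     return o + e if (3 * o + e) % 10 == 0 else 0
-- ===== Notes on version B (the rewrite author's own statement) =====
-- stated objective: alternative
-- what changed: Replaces A's forward scan with offset-parity tests and three accumulators (plus a ten-branch if-chain decoder) by a back-to-front traversal of the chunk list with a swapping accumulator pair (o, e) = (digit + e, o), so no parity test or index arithmetic is needed; decoding goes through a dict and the dead gum / i == len(code) code is dropped.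
import Mathlib
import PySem

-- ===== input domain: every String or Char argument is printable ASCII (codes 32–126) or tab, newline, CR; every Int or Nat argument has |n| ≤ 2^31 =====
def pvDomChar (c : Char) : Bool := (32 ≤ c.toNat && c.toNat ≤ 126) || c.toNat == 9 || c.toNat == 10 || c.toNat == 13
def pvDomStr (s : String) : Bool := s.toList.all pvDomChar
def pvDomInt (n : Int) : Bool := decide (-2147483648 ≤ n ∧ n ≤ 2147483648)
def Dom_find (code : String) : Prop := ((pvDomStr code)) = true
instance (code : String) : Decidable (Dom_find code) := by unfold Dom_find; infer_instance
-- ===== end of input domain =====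

-- B walks the 7-char chunks back to front with a swapping accumulator pair
-- (no parity test), decoding via a dict table; A's dead gum / i == len(code)
-- code is dropped (alternative decomposition, same cost).


-- ===== PORT A =====
-- the body of A's for-loop: sequential reassignments of code2, then the three accumulators
def stepA (code : String) (n : Int) (st : Int × Int × Int) (i : Int) : Int × Int × Int :=
  let imsi := PySem.Str.slice code (some i) (some (i + 7))
  let code2 : Int := 0
  let code2 := if imsi = "0001101" then 0 else code2
  let code2 := if imsi = "0011001" then 1 else code2
  let code2 := if imsi = "0010011" then 2 else code2
  let code2 := if imsi = "0111101" then 3 else code2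
  let code2 := if imsi = "0100011" then 4 else code2
  let code2 := if imsi = "0110001" then 5 else code2
  let code2 := if imsi = "0101111" then 6 else code2
  let code2 := if imsi = "0111011" then 7 else code2
  let code2 := if imsi = "0110111" then 8 else code2
  let code2 := if imsi = "0001011" then 9 else code2
  let odd_num := if PySem.Int.mod i 2 = 0 ∨ i = 0 then st.1 + code2 else st.1
  let even_num := if PySem.Int.mod i 2 = 1 ∧ i ≠ n then st.2.1 + code2 else st.2.1
  let gum := if i = n then st.2.2 + code2 else st.2.2
  (odd_num, even_num, gum)

def find (code : String) : Int :=
  let n := PySem.Str.len code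
  let st := (PySem.List.pyRange 0 n 7).foldl (stepA code n) (0, 0, 0)
  if PySem.Int.mod (st.1 * 3 + st.2.1 + st.2.2) 10 = 0 then st.1 + st.2.1 + st.2.2 else 0

-- ===== PORT B =====
def pvTable : PySem.Dict String Int :=
  PySem.Dict.mk [("0001101", 0), ("0011001", 1), ("0010011", 2), ("0111101", 3),
                 ("0100011", 4), ("0110001", 5), ("0101111", 6), ("0111011", 7),
                 ("0110111", 8), ("0001011", 9)]

def find_alt (code : String) : Int :=
  let chunks := (PySem.List.pyRange 0 (PySem.Str.len code) 7).map
    (fun i => PySem.Str.slice code (some i) (some (i + 7)))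
  let p := chunks.reverse.foldl
    (fun st ch => (pvTable.getD ch 0 + st.2, st.1)) ((0 : Int), (0 : Int))
  if PySem.Int.mod (3 * p.1 + p.2) 10 = 0 then p.1 + p.2 else 0

-- ===== PRECONDITION & SPEC =====
def Spec_find (code : String) (out : Int) : Prop := out = find_alt code
instance (code : String) (out : Int) : Decidable (Spec_find code out) := by unfold Spec_find; infer_instance

-- ===== CLAIM (what is proved, stated in full; the proofs are below) =====
def Claim_equal_find : Prop := ∀ (code : String), Dom_find code → Spec_find code (find code)

-- ===== LEMMAS AND PROOFS =====

-- (even-index sum, odd-index sum) of a digit list whose first element carries index s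
def pvSums (s : Int) : List Int → Int × Int
  | [] => (0, 0)
  | d :: t =>
    let r := pvSums (s + 1) t
    if PySem.Int.mod s 2 = 0 then (d + r.1, r.2) else (r.1, d + r.2)

-- B's swapping recursion, as a foldr shape
def swapSums : List Int → Int × Int
  | [] => (0, 0)
  | d :: t => (d + (swapSums t).2, (swapSums t).1)

lemma pyRange7_nil (a b : Int) (h : b ≤ a) : PySem.List.pyRange a b 7 = [] := by
  rw [PySem.List.pyRange_of_pos a b (by norm_num)]
  simp [show ¬ a < b by omega]

lemma pyRange7_cons (a b : Int) (h : a < b) :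
    PySem.List.pyRange a b 7 = a :: PySem.List.pyRange (a + 7) b 7 := by
  rw [PySem.List.pyRange_of_pos a b (by norm_num),
      PySem.List.pyRange_of_pos (a + 7) b (by norm_num)]
  by_cases h2 : a + 7 < b
  · have hc : ((b - a + 7 - 1) / 7).toNat = ((b - (a + 7) + 7 - 1) / 7).toNat + 1 := by omega
    simp only [if_pos h, if_pos h2, hc, List.range_succ_eq_map, List.map_cons, List.map_map]
    congr 1
    · norm_num
    · apply List.map_congr_left
      intro k _
      simp only [Function.comp]
      push_cast
      ring
  · have hc : ((b - a + 7 - 1) / 7).toNat = 1 := by omega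
    simp [if_pos h, if_neg h2, hc]

-- the decode if-chain of A equals the dict lookup of B
lemma decode_eq (s : String) :
    (let code2 : Int := 0
     let code2 := if s = "0001101" then 0 else code2
     let code2 := if s = "0011001" then 1 else code2
     let code2 := if s = "0010011" then 2 else code2
     let code2 := if s = "0111101" then 3 else code2
     let code2 := if s = "0100011" then 4 else code2
     let code2 := if s = "0110001" then 5 else code2
     let code2 := if s = "0101111" then 6 else code2
     let code2 := if s = "0111011" then 7 else code2
     let code2 := if s = "0110111" then 8 else code2
     let code2 := if s = "0001011" then 9 else code2
     code2) = pvTable.getD s 0 := by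
  by_cases h0 : s = "0001101"
  · subst h0; decide
  by_cases h1 : s = "0011001"
  · subst h1; decide
  by_cases h2 : s = "0010011"
  · subst h2; decide
  by_cases h3 : s = "0111101"
  · subst h3; decide
  by_cases h4 : s = "0100011"
  · subst h4; decide
  by_cases h5 : s = "0110001"
  · subst h5; decide
  by_cases h6 : s = "0101111"
  · subst h6; decide
  by_cases h7 : s = "0111011"
  · subst h7; decide
  by_cases h8 : s = "0110111"
  · subst h8; decide
  by_cases h9 : s = "0001011"
  · subst h9; decide
  simp [pvTable, PySem.Dict.getD, PySem.Dict.get?,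
        h0, h1, h2, h3, h4, h5, h6, h7, h8, h9,
        Ne.symm h0, Ne.symm h1, Ne.symm h2, Ne.symm h3, Ne.symm h4,
        Ne.symm h5, Ne.symm h6, Ne.symm h7, Ne.symm h8, Ne.symm h9]

-- pvSums only depends on the parity of the start index
lemma pvSums_add_two (t : List Int) : ∀ s : Int, pvSums (s + 2) t = pvSums s t := by
  induction t with
  | nil => intro s; rfl
  | cons d t ih =>
    intro s
    have hm : PySem.Int.mod (s + 2) 2 = PySem.Int.mod s 2 := by
      rw [PySem.Int.mod_eq_emod_of_pos (a := s + 2) (by norm_num),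
          PySem.Int.mod_eq_emod_of_pos (a := s) (by norm_num)]
      omega
    simp only [pvSums, hm, show s + 2 + 1 = s + 1 + 2 by ring, ih (s + 1)]

-- the swapping recursion computes exactly the (even, odd) index sums
lemma swapSums_eq (t : List Int) :
    pvSums 0 t = swapSums t ∧ pvSums 1 t = ((swapSums t).2, (swapSums t).1) := by
  induction t with
  | nil => exact ⟨rfl, rfl⟩
  | cons d t ih =>
    refine ⟨?_, ?_⟩
    · simp only [pvSums, swapSums, if_pos (show PySem.Int.mod 0 2 = 0 by decide)]
      rw [show (0 : Int) + 1 = 1 by ring, ih.2]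
    · simp only [pvSums, swapSums, if_neg (show ¬ PySem.Int.mod 1 2 = 0 by decide)]
      rw [show (1 : Int) + 1 = 0 + 2 by ring, pvSums_add_two, ih.1]

-- B's per-chunk digit
def pvDec (code : String) (i : Int) : Int :=
  pvTable.getD (PySem.Str.slice code (some i) (some (i + 7))) 0

-- B's reversed foldl is the swapping recursion over the decoded digit list
lemma foldB (L : List String) :
    L.reverse.foldl (fun st ch => (pvTable.getD ch 0 + st.2, st.1)) ((0 : Int), (0 : Int))
    = swapSums (L.map (fun ch => pvTable.getD ch 0)) := by
  rw [List.foldl_reverse]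
  induction L with
  | nil => rfl
  | cons ch t ih => simp only [List.foldr_cons, List.map_cons, swapSums, ih]

lemma loopA (code : String) (n : Int) :
    ∀ (q m : Nat) (o e g : Int), n ≤ 7 * m + 7 * q →
    (PySem.List.pyRange (7 * (m : Int)) n 7).foldl (stepA code n) (o, e, g)
    = (o + (pvSums m ((PySem.List.pyRange (7 * (m : Int)) n 7).map (pvDec code))).1,
       e + (pvSums m ((PySem.List.pyRange (7 * (m : Int)) n 7).map (pvDec code))).2,
       g) := by
  intro q
  induction q with
  | zero =>
    intro m o e g h
    rw [pyRange7_nil _ _ (by push_cast at h ⊢; omega)]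
    simp [pvSums]
  | succ q ih =>
    intro m o e g h
    by_cases h7 : 7 * (m : Int) < n
    · rw [pyRange7_cons _ _ h7]
      have hm2 : PySem.Int.mod (7 * (m : Int)) 2 = PySem.Int.mod (m : Int) 2 := by
        rw [PySem.Int.mod_eq_emod_of_pos (a := 7 * (m : Int)) (by norm_num),
            PySem.Int.mod_eq_emod_of_pos (a := (m : Int)) (by norm_num)]
        omega
      have hmr : PySem.Int.mod (m : Int) 2 = 0 ∨ PySem.Int.mod (m : Int) 2 = 1 := by
        rw [PySem.Int.mod_eq_emod_of_pos (a := (m : Int)) (by norm_num)]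
        omega
      have hcast : 7 * (m : Int) + 7 = 7 * ((m + 1 : Nat) : Int) := by push_cast; ring
      have hne : ¬ 7 * (m : Int) = n := by omega
      have hd : stepA code n (o, e, g) (7 * (m : Int))
          = (if PySem.Int.mod (m : Int) 2 = 0 then (o + pvDec code (7 * (m : Int)), e, g)
             else (o, e + pvDec code (7 * (m : Int)), g)) := by
        rcases hmr with hp | hp
        · simp only [stepA, hm2, hp, decode_eq, pvDec]
          norm_num [hne]
        · have hm0 : ¬ (7 * (m : Int) = 0) := by
            intro h'
            have hz : (m : Int) = 0 := by omega
            rw [hz] at hp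
            exact absurd hp (by decide)
          simp only [stepA, hm2, hp, decode_eq, pvDec]
          norm_num [hne, hm0]
      rw [List.foldl_cons, hd]
      by_cases hp : PySem.Int.mod (m : Int) 2 = 0
      · rw [if_pos hp, hcast, ih (m + 1) _ _ _ (by push_cast at h ⊢; omega)]
        simp only [List.map_cons, pvSums, if_pos hp]
        have hs : ((m : Int) + 1) = ((m + 1 : Nat) : Int) := by push_cast; ring
        rw [hs]
        simp [add_assoc]
      · rw [if_neg hp, hcast, ih (m + 1) _ _ _ (by push_cast at h ⊢; omega)]
        simp only [List.map_cons, pvSums, if_neg hp]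
        have hs : ((m : Int) + 1) = ((m + 1 : Nat) : Int) := by push_cast; ring
        rw [hs]
        simp [add_assoc]
    · rw [pyRange7_nil _ _ (by omega)]
      simp [pvSums]

-- ===== VERDICT (by name: the statement is the Claim_ definition above) =====
theorem find_spec : Claim_equal_find := by
  intro code _
  simp only [Spec_find, find, find_alt]
  have hn : 0 ≤ PySem.Str.len code := by
    simp [PySem.Str.len_eq]
  have h0 := loopA code (PySem.Str.len code) (PySem.Str.len code).toNat 0 0 0 0 (by omega)
  simp only [Nat.cast_zero, mul_zero] at h0
  rw [h0]
  have hmap : ((PySem.List.pyRange 0 (PySem.Str.len code) 7).map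
      (fun i => PySem.Str.slice code (some i) (some (i + 7)))).reverse.foldl
      (fun st ch => (pvTable.getD ch 0 + st.2, st.1)) ((0 : Int), (0 : Int))
      = swapSums ((PySem.List.pyRange 0 (PySem.Str.len code) 7).map (pvDec code)) := by
    rw [foldB, List.map_map]
    rfl
  rw [hmap]
  rw [← (swapSums_eq ((PySem.List.pyRange 0 (PySem.Str.len code) 7).map (pvDec code))).1]
  simp only [zero_add, add_zero]
  have hx : ∀ x y : Int, x * 3 + y = 3 * x + y := by intros; ring
  rw [hx]
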